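-- pv_equiv track=rewrite | github.com/artprzybylek/python-intern | hack_power.py | _power_from_letters
-- ===== SOURCE A (Python) =====
-- LETTERS_POWER = {'a': 1, 'b': 2, 'c': 3}
--
-- def _power_from_letters(hack):
--     letters_instances = {letter: 0 for letter in LETTERS_POWER}
--     power = 0
--     for letter in hack:
--         if letter not in LETTERS_POWER:
--             return 0
--         else:
--             letters_instances[letter] += 1
--             power += letters_instances[letter] * LETTERS_POWER[letter]
--     return power
-- ===== SOURCE B (Python) =====
-- LETTERS_POWER = {'a': 1, 'b': 2, 'c': 3}
--
--
-- def _power_from_letters(hack):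
--     # Any invalid character anywhere makes the whole power 0.
--     if any(letter not in LETTERS_POWER for letter in hack):
--         return 0
--     # k-th occurrence of a letter contributes k * weight, so a letter with
--     # n occurrences contributes weight * n*(n+1)//2 (triangular number).
--     return sum(power * (hack.count(letter) * (hack.count(letter) + 1) // 2)
--                for letter, power in LETTERS_POWER.items())
-- ===== Notes on version B (the rewrite author's own statement) =====
-- stated objective: simpler
-- what changed: Replaces the incremental per-occurrence accumulation with an occurrence count per letter and the closed-form triangular number weight * n*(n+1)//2, after a single validity scan.
import Mathlib
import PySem

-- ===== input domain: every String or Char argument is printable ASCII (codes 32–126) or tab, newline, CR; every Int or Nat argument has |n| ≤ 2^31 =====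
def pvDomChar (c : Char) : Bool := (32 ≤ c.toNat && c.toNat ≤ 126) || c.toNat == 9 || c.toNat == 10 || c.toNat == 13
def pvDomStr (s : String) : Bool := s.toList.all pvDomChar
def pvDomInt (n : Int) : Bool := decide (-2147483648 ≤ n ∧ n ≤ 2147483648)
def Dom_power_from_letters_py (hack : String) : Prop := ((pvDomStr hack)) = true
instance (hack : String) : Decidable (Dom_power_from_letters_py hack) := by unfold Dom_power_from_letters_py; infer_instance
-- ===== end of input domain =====

-- B replaces A's incremental per-occurrence accumulation with per-letter counts and the
-- closed-form triangular number weight * n*(n+1)//2 (objective: simpler).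

-- LETTERS_POWER = {'a': 1, 'b': 2, 'c': 3}
def pvLP : PySem.Dict Char Int := PySem.Dict.ofList [('a', 1), ('b', 2), ('c', 3)]

-- ===== PORT A =====
-- the for-loop of A: state is (letters_instances, power); early 'return 0' on an invalid letter
def pvALoop : List Char → PySem.Dict Char Int → Int → Int
  | [], _, power => power
  | letter :: rest, inst, power =>
      if !(pvLP.contains letter) then 0
      else
        let inst' := inst.modify letter 0 (· + 1)   -- letters_instances[letter] += 1 (key always present)
        pvALoop rest inst' (power + inst'.getD letter 0 * pvLP.getD letter 0)

def power_from_letters_py (hack : String) : Int :=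
  -- letters_instances = {letter: 0 for letter in LETTERS_POWER}
  pvALoop hack.toList (PySem.Dict.ofList [('a', 0), ('b', 0), ('c', 0)]) 0

-- ===== PORT B =====
def power_from_letters_py_alt (hack : String) : Int :=
  let cs := hack.toList
  if cs.any (fun letter => !(pvLP.contains letter)) then 0
  else
    -- hack.count(letter) for a single character equals the character count
    pvLP.items.foldl
      (fun acc lp =>
        acc + lp.2 * PySem.Int.floordiv ((cs.count lp.1 : Int) * ((cs.count lp.1 : Int) + 1)) 2)
      0

-- ===== PRECONDITION & SPEC =====
def Spec_power_from_letters_py (hack : String) (out : Int) : Prop := out = power_from_letters_py_alt hack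
instance (hack : String) (out : Int) : Decidable (Spec_power_from_letters_py hack out) := by unfold Spec_power_from_letters_py; infer_instance

-- ===== CLAIM (what is proved, stated in full; the proofs are below) =====
def Claim_equal_power_from_letters_py : Prop := ∀ (hack : String), Dom_power_from_letters_py hack → Spec_power_from_letters_py hack (power_from_letters_py hack)

-- ===== LEMMAS AND PROOFS =====

-- Σ_{i=1..c} (n+i): what A's running power accumulates for one letter of weight 1,
-- starting from a current instance count n
def pvSumFrom (n : Int) : Nat → Int
  | 0 => 0
  | c + 1 => (n + 1) + pvSumFrom (n + 1) c

lemma pv_two_sumFrom (c : Nat) : ∀ n : Int, 2 * pvSumFrom n c = c * (2 * n + c + 1) := by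
  induction c with
  | zero => intro n; simp [pvSumFrom]
  | succ c ih =>
      intro n
      have := ih (n + 1)
      simp only [pvSumFrom]
      push_cast
      push_cast at this
      linarith [this]

lemma pv_sumFrom_zero (c : Nat) :
    pvSumFrom 0 c = PySem.Int.floordiv ((c : Int) * ((c : Int) + 1)) 2 := by
  have h2 := pv_two_sumFrom c 0
  norm_num at h2
  rw [PySem.Int.floordiv_eq_ediv_of_pos (by norm_num)]
  omega

lemma pv_contains_iff (c : Char) :
    pvLP.contains c = true ↔ (c = 'a' ∨ c = 'b' ∨ c = 'c') := by
  constructor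
  · intro h
    by_contra hn
    push_neg at hn
    obtain ⟨h1, h2, h3⟩ := hn
    rw [show pvLP.contains c = ('a' == c || ('b' == c || ('c' == c || false))) from by
      simp [pvLP, PySem.Dict.ofList, PySem.Dict.empty, PySem.Dict.update, PySem.Dict.contains,
        PySem.Dict.insert]] at h
    simp only [Bool.or_eq_true, beq_iff_eq] at h
    rcases h with h | h | h | h
    · exact h1 h.symm
    · exact h2 h.symm
    · exact h3 h.symm
    · exact absurd h (by simp)
  · rintro (rfl | rfl | rfl) <;> decide

lemma pvSumFrom_succ (n : Int) (c : Nat) :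
    pvSumFrom n (c + 1) = (n + 1) + pvSumFrom (n + 1) c := rfl

lemma pv_getD_modify_ne (d : PySem.Dict Char Int) (k k' : Char) (h : k' ≠ k) :
    (d.modify k 0 (· + 1)).getD k' 0 = d.getD k' 0 :=
  PySem.Dict.getD_modify_of_ne d 0 _ h

lemma pv_loop_eq (cs : List Char) : ∀ (d : PySem.Dict Char Int) (p : Int),
    pvALoop cs d p =
      if cs.all (fun c => pvLP.contains c) then
        p + pvSumFrom (d.getD 'a' 0) (cs.count 'a')
          + 2 * pvSumFrom (d.getD 'b' 0) (cs.count 'b')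
          + 3 * pvSumFrom (d.getD 'c' 0) (cs.count 'c')
      else 0 := by
  induction cs with
  | nil => intro d p; simp [pvALoop, pvSumFrom]
  | cons c rest ih =>
      intro d p
      by_cases hv : pvLP.contains c = true
      · rcases (pv_contains_iff c).1 hv with rfl | rfl | rfl
        · rw [show pvALoop ('a' :: rest) d p
                = pvALoop rest (d.modify 'a' 0 (· + 1))
                    (p + (d.modify 'a' 0 (· + 1)).getD 'a' 0 * pvLP.getD 'a' 0) from by
              simp [pvALoop, hv]]
          rw [ih]
          simp only [PySem.Dict.getD_modify_self, pv_getD_modify_ne d 'a' 'b' (by decide),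
            pv_getD_modify_ne d 'a' 'c' (by decide), List.all_cons, hv, Bool.true_and,
            List.count_cons]
          norm_num [show pvLP.getD 'a' 0 = 1 from by decide]
          simp only [pvSumFrom_succ]
          split <;> ring_nf <;> (try simp) <;> (try ring)
        · rw [show pvALoop ('b' :: rest) d p
                = pvALoop rest (d.modify 'b' 0 (· + 1))
                    (p + (d.modify 'b' 0 (· + 1)).getD 'b' 0 * pvLP.getD 'b' 0) from by
              simp [pvALoop, hv]]
          rw [ih]
          simp only [PySem.Dict.getD_modify_self, pv_getD_modify_ne d 'b' 'a' (by decide),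
            pv_getD_modify_ne d 'b' 'c' (by decide), List.all_cons, hv, Bool.true_and,
            List.count_cons]
          norm_num [show pvLP.getD 'b' 0 = 2 from by decide]
          simp only [pvSumFrom_succ]
          split <;> ring_nf <;> (try simp) <;> (try ring)
        · rw [show pvALoop ('c' :: rest) d p
                = pvALoop rest (d.modify 'c' 0 (· + 1))
                    (p + (d.modify 'c' 0 (· + 1)).getD 'c' 0 * pvLP.getD 'c' 0) from by
              simp [pvALoop, hv]]
          rw [ih]
          simp only [PySem.Dict.getD_modify_self, pv_getD_modify_ne d 'c' 'a' (by decide),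
            pv_getD_modify_ne d 'c' 'b' (by decide), List.all_cons, hv, Bool.true_and,
            List.count_cons]
          norm_num [show pvLP.getD 'c' 0 = 3 from by decide]
          simp only [pvSumFrom_succ]
          split <;> ring_nf <;> (try simp) <;> (try ring)
      · have hall : ((c :: rest).all fun c => pvLP.contains c) = false := by
          simp [List.all_cons, hv]
        simp [pvALoop, hv, hall]

theorem power_from_letters_py_spec : Claim_equal_power_from_letters_py := by
  intro hack _
  unfold Spec_power_from_letters_py power_from_letters_py power_from_letters_py_alt
  rw [pv_loop_eq]
  by_cases h : (hack.toList.all fun c => pvLP.contains c) = true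
  · have hany : (hack.toList.any fun letter => !(pvLP.contains letter)) = false := by
      rw [List.any_eq_false]
      simp only [List.all_eq_true] at h
      intro x hx
      simp [h x hx]
    rw [if_pos h]
    have ha := pv_sumFrom_zero (hack.toList.count 'a')
    have hb := pv_sumFrom_zero (hack.toList.count 'b')
    have hc := pv_sumFrom_zero (hack.toList.count 'c')
    simp only [hany, Bool.false_eq_true, if_false,
      show pvLP.items = [('a', (1:Int)), ('b', 2), ('c', 3)] from by decide, List.foldl,
      show (PySem.Dict.ofList [('a', (0:Int)), ('b', 0), ('c', 0)]).getD 'a' 0 = 0 from by decide,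
      show (PySem.Dict.ofList [('a', (0:Int)), ('b', 0), ('c', 0)]).getD 'b' 0 = 0 from by decide,
      show (PySem.Dict.ofList [('a', (0:Int)), ('b', 0), ('c', 0)]).getD 'c' 0 = 0 from by decide]
    rw [ha, hb, hc]
    ring
  · have hany : (hack.toList.any fun letter => !(pvLP.contains letter)) = true := by
      simp only [List.all_eq_true] at h
      push_neg at h
      obtain ⟨x, hx, hxc⟩ := h
      simp only [List.any_eq_true]
      exact ⟨x, hx, by simp [hxc]⟩
    rw [if_neg h]
    simp only [hany, if_true]
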